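-- pv_equiv track=rewrite | github.com/Milobe115/AoC-2023 | day14/star2.py | speen
-- ===== SOURCE A (Python) =====
-- def transpose(matrix):
--     return tuple(map(lambda x: "".join(x), [*zip(*matrix)]))
--
-- def tilt(matrix, direction):
--     trans = direction in "NS"
--     reverse = direction in "NW"
--     if trans:
--         matrix = transpose(matrix)
--     res = ()
--     for row in matrix:
--         res += ("#".join("".join(sorted(chunk, reverse=reverse)) for chunk in row.split("#")),)
--     if trans:
--         res = transpose(res)
--     return res
--
-- def speen_cycle(matrix):
--     for dir in "NWSE":
--         matrix = tilt(matrix, dir)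
--     return matrix
--
-- def speen(matrix, N):
--     result = matrix
--     cache = {result: 0}
--     i = 1
--     while i <= N:
--         result = speen_cycle(result)
--         if result not in cache:
--             cache[result] = i
--         else:
--             period = i - cache[result]
--             idx = cache[result] + (N - cache[result]) % period
--             for key, val in cache.items():
--                 if val == idx:
--                     return key
--         i += 1
--     return result
-- ===== SOURCE B (Python) =====
-- # B: tilt reimplemented as a one-pass bucket/counting scan per line (segment char
-- # counts flushed at each '#') instead of split-on-'#' + comparison sort; the cycle
-- # loop keeps an ordered list of states so the jumped-to state is indexed directly
-- # instead of re-scanning the cache for the key with the wanted value.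
--
-- def _transpose(matrix):
--     return tuple(map(lambda x: "".join(x), [*zip(*matrix)]))
--
-- def _emit(counts, rev):
--     rng = range(127, -1, -1) if rev else range(128)
--     return "".join(chr(c) * counts[c] for c in rng)
--
-- def _tilt_row(row, rev):
--     out = []
--     counts = [0] * 128
--     for ch in row:
--         if ch == "#":
--             out.append(_emit(counts, rev))
--             out.append("#")
--             counts = [0] * 128
--         else:
--             counts[ord(ch)] += 1
--     out.append(_emit(counts, rev))
--     return "".join(out)
--
-- def _tilt(matrix, trans, rev):
--     if trans:
--         matrix = _transpose(matrix)
--     res = tuple(_tilt_row(row, rev) for row in matrix)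
--     if trans:
--         res = _transpose(res)
--     return res
--
-- def _cycle(matrix):
--     matrix = _tilt(matrix, True, True)    # N
--     matrix = _tilt(matrix, False, True)   # W
--     matrix = _tilt(matrix, True, False)   # S
--     matrix = _tilt(matrix, False, False)  # E
--     return matrix
--
-- def speen(matrix, N):
--     result = matrix
--     seen = {result: 0}
--     states = [result]
--     i = 1
--     while i <= N:
--         result = _cycle(result)
--         v = seen.get(result)
--         if v is not None:
--             period = i - v
--             return states[v + (N - v) % period]
--         seen[result] = i
--         states.append(result)
--         i += 1
--     return result
-- ===== Notes on version B (the rewrite author's own statement) =====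
-- stated objective: faster
-- what changed: tilt is re-implemented as a single gravity-style pass per line that keeps per-segment character-bucket counts and flushes them (in code-point order or reverse) at each '#', instead of splitting each line on '#' and comparison-sorting every chunk; the cycle-detection loop additionally keeps an ordered list of seen states so the jumped-to state is indexed directly instead of re-scanning the cache for the key with the wanted value.
import Mathlib
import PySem

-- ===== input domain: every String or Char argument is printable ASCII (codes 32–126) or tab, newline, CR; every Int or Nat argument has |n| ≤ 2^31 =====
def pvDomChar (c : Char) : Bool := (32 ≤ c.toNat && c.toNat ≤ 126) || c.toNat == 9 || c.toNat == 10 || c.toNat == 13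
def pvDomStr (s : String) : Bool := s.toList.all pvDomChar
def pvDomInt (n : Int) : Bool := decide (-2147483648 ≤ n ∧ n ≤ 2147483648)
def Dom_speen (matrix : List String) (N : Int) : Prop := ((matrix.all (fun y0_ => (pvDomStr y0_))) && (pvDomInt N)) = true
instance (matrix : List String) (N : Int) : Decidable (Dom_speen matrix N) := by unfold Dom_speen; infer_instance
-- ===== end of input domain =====

-- B re-implements tilt as a one-pass bucket/counting scan per line instead of
-- split-on-'#' + comparison sort, and indexes the jumped-to state in an ordered
-- state list instead of re-scanning the cache; same results, measured faster on large grids.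

-- ===== PORT A =====
-- transpose(matrix): hand port of tuple(map("".join, zip(*matrix))) — zip truncates
-- at the shortest row (exact, including ragged and empty matrices).  Source B's
-- _transpose is the identical Python code, so both ports share this helper.
def pyTranspose (m : List String) : List String :=
  let rows := m.map String.toList
  match (rows.map List.length).min? with
  | none => []
  | some n => (List.range n).map (fun j => String.ofList (rows.map (fun r => r.getD j ' ')))

-- "#".join("".join(sorted(chunk, reverse=reverse)) for chunk in row.split("#"))
def tiltRowA (row : List Char) (rev : Bool) : List Char :=
  PySem.Chars.join ['#'] ((PySem.Chars.splitOn row ['#']).map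
    (fun chunk => PySem.List.sorted chunk (fun x => x) rev))

def tiltA (m : List String) (trans rev : Bool) : List String :=
  let m1 := if trans then pyTranspose m else m
  let res := m1.map (fun row => String.ofList (tiltRowA row.toList rev))
  if trans then pyTranspose res else res

-- for dir in "NWSE": matrix = tilt(matrix, dir)   (N: trans+rev, W: rev, S: trans, E: –)
def speenCycleA (m : List String) : List String :=
  tiltA (tiltA (tiltA (tiltA m true true) false true) true false) false false

-- while i <= N: … — fuel = number of remaining iterations (= N.toNat at the top call)
def speenLoopA (N : Int) (cache : PySem.Dict (List String) Int) (result : List String)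
    (i : Int) : Nat → List String
  | 0 => result
  | fuel + 1 =>
    let r := speenCycleA result
    if cache.contains r = false then
      speenLoopA N (cache.insert r i) r (i + 1) fuel
    else
      match cache.get? r with
      | some v =>
        let period := i - v
        let idx := v + PySem.Int.mod (N - v) period
        match cache.items.find? (fun kv => kv.2 == idx) with
        | some kv => kv.1
        | none => speenLoopA N cache r (i + 1) fuel   -- for-loop falls through: i += 1
      | none => r   -- unreachable: contains r is true, so cache[r] does not raise

def speen (matrix : List String) (N : Int) : List String :=
  speenLoopA N (PySem.Dict.empty.insert matrix 0) matrix 1 N.toNat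

-- ===== PORT B =====
-- _emit(counts, rev): "".join(chr(c) * counts[c] for c in rng)
def emitB (counts : List Nat) (rev : Bool) : List Char :=
  let rng := if rev then (List.range 128).reverse else List.range 128  -- range(127,-1,-1) / range(128)
  rng.flatMap (fun c => List.replicate (counts.getD c 0) (Char.ofNat c))

-- _tilt_row: one pass, bucket counts per '#'-segment, flushed at each '#'
def tiltRowB (row : List Char) (rev : Bool) : List Char :=
  let s := row.foldl
    (fun (s : List Char × List Nat) ch =>
      if ch = '#' then (s.1 ++ emitB s.2 rev ++ ['#'], List.replicate 128 0)
      else (s.1, s.2.set ch.toNat (s.2.getD ch.toNat 0 + 1)))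
    ([], List.replicate 128 0)
  s.1 ++ emitB s.2 rev

def tiltB (m : List String) (trans rev : Bool) : List String :=
  let m1 := if trans then pyTranspose m else m
  let res := m1.map (fun row => String.ofList (tiltRowB row.toList rev))
  if trans then pyTranspose res else res

def speenCycleB (m : List String) : List String :=
  tiltB (tiltB (tiltB (tiltB m true true) false true) true false) false false

def speenLoopB (N : Int) (seen : PySem.Dict (List String) Int) (states : List (List String))
    (result : List String) (i : Int) : Nat → List String
  | 0 => result
  | fuel + 1 =>
    let r := speenCycleB result
    match seen.get? r with
    | some v =>
      let period := i - v
      match PySem.List.pyGet? states (v + PySem.Int.mod (N - v) period) with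
      | some s => s
      | none => r   -- unreachable: the index always lies in range (Python would raise)
    | none => speenLoopB N (seen.insert r i) (states ++ [r]) r (i + 1) fuel

def speen_alt (matrix : List String) (N : Int) : List String :=
  speenLoopB N (PySem.Dict.empty.insert matrix 0) [matrix] matrix 1 N.toNat

-- ===== PRECONDITION & SPEC =====
def Spec_speen (matrix : List String) (N : Int) (out : List String) : Prop := out = speen_alt matrix N
instance (matrix : List String) (N : Int) (out : List String) : Decidable (Spec_speen matrix N out) := by unfold Spec_speen; infer_instance

-- ===== CLAIM (what is proved, stated in full; the proofs are below) =====
def Claim_equal_speen : Prop := ∀ (matrix : List String) (N : Int), Dom_speen matrix N → Spec_speen matrix N (speen matrix N)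

-- ===== LEMMAS AND PROOFS =====

-- all character codes below 128 (guaranteed by Dom_speen, preserved by every tilt)
def OkR (row : List Char) : Prop := ∀ c ∈ row, c.toNat < 128
def OkS (m : List String) : Prop := ∀ s ∈ m, OkR s.toList

-- reference shape of row.split("#") (proved equal to PySem.Chars.splitOn · ['#'])
def splitSpec (pre : List Char) : List Char → List (List Char)
  | [] => [pre]
  | c :: rest => if c = '#' then pre :: splitSpec [] rest else splitSpec (pre ++ [c]) rest

-- bucket counts of a segment: index c ↦ number of occurrences of chr(c)
def countsOf (l : List Char) : List Nat := (List.range 128).map (fun c => l.count (Char.ofNat c))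

-- the fold body of tiltRowB, named for the proofs
def stepB (rev : Bool) (s : List Char × List Nat) (ch : Char) : List Char × List Nat :=
  if ch = '#' then (s.1 ++ emitB s.2 rev ++ ['#'], List.replicate 128 0)
  else (s.1, s.2.set ch.toNat (s.2.getD ch.toNat 0 + 1))

theorem go_eq (l : List Char) : ∀ (fuel : Nat) (cur : List Char) (acc : List (List Char)),
    l.length ≤ fuel →
    PySem.Chars.splitOn.go ['#'] fuel l cur acc = acc.reverse ++ splitSpec cur.reverse l := by
  induction l with
  | nil =>
    intro fuel cur acc _
    cases fuel <;> simp [PySem.Chars.splitOn.go, splitSpec]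
  | cons c rest ih =>
    intro fuel cur acc h
    cases fuel with
    | zero => simp at h
    | succ f =>
      by_cases hc : c = '#'
      · subst hc
        rw [PySem.Chars.splitOn.go]
        rw [if_pos (by simp [List.isPrefixOf])]
        have : List.drop (['#'] : List Char).length ('#' :: rest) = rest := by simp
        rw [show PySem.Chars.splitOn.go ['#'] f (List.drop (['#'] : List Char).length ('#' :: rest)) [] (cur.reverse :: acc) = PySem.Chars.splitOn.go ['#'] f rest [] (cur.reverse :: acc) from by rw [this]]
        rw [ih f [] (cur.reverse :: acc) (by simpa using h)]
        simp [splitSpec]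
      · rw [PySem.Chars.splitOn.go]
        rw [if_neg (by simp [List.isPrefixOf]; exact fun h' => hc h'.symm)]
        rw [ih f (c :: cur) acc (by simpa using h)]
        simp [splitSpec, hc]

theorem splitOn_sharp (l : List Char) : PySem.Chars.splitOn l ['#'] = splitSpec [] l := by
  rw [PySem.Chars.splitOn, go_eq l (l.length + 1) [] [] (by omega)]
  simp

theorem toNat_ofNat_lt {n : Nat} (h : n < 128) : (Char.ofNat n).toNat = n := by
  rw [Char.toNat_ofNat, if_pos]
  exact Or.inl (by omega)

theorem countsOf_nil : countsOf [] = List.replicate 128 0 := by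
  simp [countsOf, List.map_const']

theorem getD_countsOf (l : List Char) {n : Nat} (h : n < 128) :
    (countsOf l).getD n 0 = l.count (Char.ofNat n) := by
  rw [List.getD_eq_getElem?_getD]
  simp [countsOf, h]

theorem set_countsOf (l : List Char) {c : Char} (hc : c.toNat < 128) :
    (countsOf l).set c.toNat ((countsOf l).getD c.toNat 0 + 1) = countsOf (l ++ [c]) := by
  apply List.ext_getElem
  · simp [countsOf]
  · intro i hi hi2
    simp only [countsOf, List.length_map, List.length_range] at hi2
    rw [List.getElem_set]
    simp only [countsOf, List.getElem_map, List.getElem_range]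
    split_ifs with he
    · subst he
      rw [show (List.map (fun c => List.count (Char.ofNat c) l) (List.range 128)) = countsOf l from rfl,
        getD_countsOf l hc, List.count_append, Char.ofNat_toNat]
      simp
    · rw [List.count_append]
      have : List.count (Char.ofNat i) [c] = 0 := by
        simp only [List.count_singleton]
        rw [if_neg]
        intro hcc
        apply he
        have := congrArg Char.toNat (beq_iff_eq.mp hcc)
        rwa [toNat_ofNat_lt hi2] at this
      omega

theorem count_emit (counts : List Nat) (rev : Bool) (x : Char) :
    (emitB counts rev).count x =
      if x.toNat < 128 then counts.getD x.toNat 0 else 0 := by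
  have hsum : ∀ f : Nat → Nat, ((List.range 128).map f).sum = ∑ i ∈ Finset.range 128, f i :=
    fun f => by simp [Finset.range, Multiset.range]
  have key : ((List.range 128).map
      (fun c => List.count x (List.replicate (counts.getD c 0) (Char.ofNat c)))).sum =
      if x.toNat < 128 then counts.getD x.toNat 0 else 0 := by
    rw [hsum]
    split_ifs with h
    · rw [Finset.sum_eq_single_of_mem x.toNat (Finset.mem_range.mpr h)]
      · rw [List.count_replicate, if_pos (by rw [beq_iff_eq, Char.ofNat_toNat])]
      · intro b hb hne
        rw [List.count_replicate, if_neg]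
        rw [beq_iff_eq]
        intro he
        apply hne
        have := congrArg Char.toNat he
        rwa [toNat_ofNat_lt (Finset.mem_range.mp hb)] at this
    · apply Finset.sum_eq_zero
      intro b hb
      rw [List.count_replicate, if_neg]
      rw [beq_iff_eq]
      intro he
      have := congrArg Char.toNat he
      rw [toNat_ofNat_lt (Finset.mem_range.mp hb)] at this
      have hb' := Finset.mem_range.mp hb
      omega
  cases rev with
  | false => simpa [emitB, List.count_flatMap, Function.comp_def] using key
  | true =>
    rw [← key]
    simp [emitB, List.count_flatMap, Function.comp_def, List.map_reverse, List.sum_reverse]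

theorem perm_emit (l : List Char) (rev : Bool) (hok : OkR l) :
    (emitB (countsOf l) rev).Perm l := by
  rw [List.perm_iff_count]
  intro a
  rw [count_emit]
  split_ifs with h
  · rw [getD_countsOf l h, Char.ofNat_toNat]
  · rw [eq_comm, List.count_eq_zero]
    intro hmem
    exact h (hok a hmem)

theorem ofNat_le_ofNat {a b : Nat} (ha : a < 128) (hb : b < 128) (h : a ≤ b) :
    Char.ofNat a ≤ Char.ofNat b := by
  have : (Char.ofNat a).toNat ≤ (Char.ofNat b).toNat := by
    rw [toNat_ofNat_lt ha, toNat_ofNat_lt hb]; exact h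
  exact this

theorem pairwise_emit_asc (counts : List Nat) :
    List.Pairwise (fun a b : Char => a ≤ b) (emitB counts false) := by
  rw [emitB]
  simp only [if_neg Bool.false_ne_true]
  rw [List.pairwise_flatMap]
  constructor
  · intro a _
    rw [List.pairwise_replicate]
    exact Or.inr le_rfl
  · rw [List.pairwise_iff_getElem]
    intro i j hi hj hij
    simp only [List.getElem_range] at *
    intro x hx y hy
    rw [List.eq_of_mem_replicate hx, List.eq_of_mem_replicate hy]
    rw [List.length_range] at hi hj
    exact ofNat_le_ofNat hi hj (by omega)

theorem pairwise_emit_desc (counts : List Nat) :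
    List.Pairwise (fun a b : Char => b ≤ a) (emitB counts true) := by
  rw [emitB]
  simp only [reduceIte]
  rw [List.pairwise_flatMap]
  constructor
  · intro a _
    rw [List.pairwise_replicate]
    exact Or.inr le_rfl
  · rw [List.pairwise_reverse, List.pairwise_iff_getElem]
    intro i j hi hj hij
    simp only [List.getElem_range] at *
    intro x hx y hy
    rw [List.eq_of_mem_replicate hx, List.eq_of_mem_replicate hy]
    rw [List.length_range] at hi hj
    exact ofNat_le_ofNat hi hj (by omega)

theorem countSort (l : List Char) (rev : Bool) (hok : OkR l) :
    emitB (countsOf l) rev = PySem.List.sorted l (fun x => x) rev := by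
  cases rev with
  | false =>
    refine (List.Perm.eq_of_pairwise (le := fun a b : Char => a ≤ b)
      (fun a b _ _ h1 h2 => le_antisymm h1 h2)
      (PySem.List.sorted_pairwise l (fun x => x))
      (pairwise_emit_asc (countsOf l))
      (((PySem.List.sorted_perm l (fun x => x) false)).trans (perm_emit l false hok).symm)).symm
  | true =>
    refine (List.Perm.eq_of_pairwise (le := fun a b : Char => b ≤ a)
      (fun a b _ _ h1 h2 => le_antisymm h2 h1)
      (PySem.List.sorted_pairwise_rev l (fun x => x))
      (pairwise_emit_desc (countsOf l))
      (((PySem.List.sorted_perm l (fun x => x) true)).trans (perm_emit l true hok).symm)).symm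

theorem foldl_stepB_acc (rev : Bool) (row : List Char) :
    ∀ (acc : List Char) (cnt : List Nat),
    row.foldl (stepB rev) (acc, cnt)
      = (acc ++ (row.foldl (stepB rev) ([], cnt)).1, (row.foldl (stepB rev) ([], cnt)).2) := by
  induction row with
  | nil => intro acc cnt; simp
  | cons c rest ih =>
    intro acc cnt
    by_cases hc : c = '#'
    · simp only [List.foldl_cons, stepB, if_pos hc]
      rw [ih (acc ++ emitB cnt rev ++ ['#']), ih (([] : List Char) ++ emitB cnt rev ++ ['#'])]
      simp
    · simp only [List.foldl_cons, stepB, if_neg hc]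
      rw [ih acc, ih []]

theorem splitSpec_ne_nil (pre : List Char) (l : List Char) : splitSpec pre l ≠ [] := by
  induction l generalizing pre with
  | nil => simp [splitSpec]
  | cons c rest ih =>
    rw [splitSpec]
    split_ifs
    · simp
    · exact ih _

theorem scan_main (rev : Bool) (row : List Char) :
    ∀ (pre : List Char), OkR pre → OkR row → '#' ∉ pre →
    (row.foldl (stepB rev) ([], countsOf pre)).1
        ++ emitB (row.foldl (stepB rev) ([], countsOf pre)).2 rev
      = PySem.Chars.join ['#'] ((splitSpec pre row).map
          (fun chunk => PySem.List.sorted chunk (fun x => x) rev)) := by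
  induction row with
  | nil =>
    intro pre hpre _ _
    simp only [List.foldl_nil]
    rw [countSort pre rev hpre, splitSpec]
    simp [PySem.Chars.join_singleton]
  | cons c rest ih =>
    intro pre hpre hrow hsharp
    by_cases hc : c = '#'
    · subst hc
      simp only [List.foldl_cons, stepB, reduceIte, List.nil_append]
      rw [foldl_stepB_acc, ← countsOf_nil]
      have hrest : OkR rest := fun x hx => hrow x (List.mem_cons_of_mem _ hx)
      have := ih [] (by intro x hx; simp at hx) hrest (by simp)
      rw [splitSpec, if_pos rfl]
      obtain ⟨h0, t0, ht⟩ : ∃ h0 t0, splitSpec ([] : List Char) rest = h0 :: t0 := by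
        cases hsp : splitSpec ([] : List Char) rest with
        | nil => exact absurd hsp (splitSpec_ne_nil _ _)
        | cons a b => exact ⟨a, b, rfl⟩
      rw [ht] at this ⊢
      simp only [List.map_cons, PySem.Chars.join_cons_cons]
      rw [countSort pre rev hpre] at *
      simp only [List.map_cons] at this
      rw [← this]
      simp
    · simp only [List.foldl_cons, stepB, if_neg hc]
      have hcn : c.toNat < 128 := hrow c List.mem_cons_self
      rw [set_countsOf pre hcn]
      have hrest : OkR rest := fun x hx => hrow x (List.mem_cons_of_mem _ hx)
      have hpre' : OkR (pre ++ [c]) := by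
        intro x hx
        rcases List.mem_append.mp hx with h | h
        · exact hpre x h
        · simp at h; subst h; exact hcn
      have hsharp' : '#' ∉ pre ++ [c] := by
        intro h
        rcases List.mem_append.mp h with h | h
        · exact hsharp h
        · rw [List.mem_singleton] at h
          exact hc h.symm
      rw [ih (pre ++ [c]) hpre' hrest hsharp']
      rw [splitSpec, if_neg hc]

theorem tiltRow_eq (row : List Char) (rev : Bool) (hok : OkR row) :
    tiltRowB row rev = tiltRowA row rev := by
  rw [tiltRowA, splitOn_sharp]
  have : tiltRowB row rev
      = (row.foldl (stepB rev) ([], countsOf [])).1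
          ++ emitB (row.foldl (stepB rev) ([], countsOf [])).2 rev := by
    rw [tiltRowB, countsOf_nil]
    rfl
  rw [this, scan_main rev row [] (by intro x hx; simp at hx) hok (by simp)]

theorem ok_emit (counts : List Nat) (rev : Bool) : OkR (emitB counts rev) := by
  intro x hx
  rw [emitB] at hx
  simp only [List.mem_flatMap] at hx
  obtain ⟨c, hc, hx⟩ := hx
  rw [List.eq_of_mem_replicate hx]
  have hc128 : c < 128 := by
    cases rev with
    | false => simpa using hc
    | true => simpa using hc
  rw [Char.toNat_ofNat, if_pos (Or.inl (by omega))]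
  omega

theorem ok_tiltRowB (row : List Char) (rev : Bool) : OkR (tiltRowB row rev) := by
  rw [tiltRowB]
  have main : ∀ (l : List Char) (acc : List Char) (cnt : List Nat), OkR acc →
      OkR (l.foldl (stepB rev) (acc, cnt)).1 := by
    intro l
    induction l with
    | nil => intro acc cnt h; exact h
    | cons c rest ih =>
      intro acc cnt h
      by_cases hc : c = '#'
      · simp only [List.foldl_cons, stepB, if_pos hc]
        apply ih
        intro x hx
        rcases List.mem_append.mp hx with hx | hx
        · rcases List.mem_append.mp hx with hx | hx
          · exact h x hx
          · exact ok_emit cnt rev x hx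
        · rw [List.mem_singleton] at hx; subst hx; decide
      · simp only [List.foldl_cons, stepB, if_neg hc]
        exact ih acc _ h
  intro x hx
  rcases List.mem_append.mp hx with hx | hx
  · exact main row [] _ (by intro y hy; simp at hy) x hx
  · exact ok_emit _ rev x hx

theorem ok_transpose (m : List String) (hok : OkS m) : OkS (pyTranspose m) := by
  intro s hs
  simp only [pyTranspose] at hs
  cases hmin : ((m.map String.toList).map List.length).min? with
  | none => rw [hmin] at hs; simp at hs
  | some n =>
    rw [hmin] at hs
    simp only [List.mem_map, List.mem_range] at hs
    obtain ⟨j, hj, rfl⟩ := hs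
    intro c hc
    rw [String.toList_ofList] at hc
    simp only [List.mem_map] at hc
    obtain ⟨r, hr, rfl⟩ := hc
    obtain ⟨str, hstr, rfl⟩ := hr
    by_cases hlen : j < str.toList.length
    · rw [List.getD_eq_getElem _ _ hlen]
      exact hok str hstr _ (List.getElem_mem hlen)
    · rw [List.getD_eq_default _ _ (by omega)]
      decide

theorem ok_tiltB (m : List String) (trans rev : Bool) :
    OkS (tiltB m trans rev) := by
  rw [tiltB]
  have hmid : ∀ (mm : List String), OkS (mm.map (fun row => String.ofList (tiltRowB row.toList rev))) := by
    intro mm s hs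
    simp only [List.mem_map] at hs
    obtain ⟨row, _, rfl⟩ := hs
    rw [String.toList_ofList]
    exact ok_tiltRowB _ rev
  cases trans with
  | false => simpa using hmid m
  | true =>
    simp only [reduceIte]
    exact ok_transpose _ (hmid (pyTranspose m))

theorem tiltB_eq_tiltA (m : List String) (trans rev : Bool) (hok : OkS m) :
    tiltB m trans rev = tiltA m trans rev := by
  rw [tiltA, tiltB]
  have hm1 : OkS (if trans then pyTranspose m else m) := by
    cases trans with
    | false => simpa using hok
    | true => simpa using ok_transpose m hok
  have : (if trans then pyTranspose m else m).map (fun row => String.ofList (tiltRowB row.toList rev))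
      = (if trans then pyTranspose m else m).map (fun row => String.ofList (tiltRowA row.toList rev)) := by
    apply List.map_congr_left
    intro row hrow
    rw [tiltRow_eq row.toList rev (hm1 row hrow)]
  rw [this]

theorem cycle_eq (m : List String) (hok : OkS m) : speenCycleB m = speenCycleA m := by
  rw [speenCycleA, speenCycleB]
  rw [tiltB_eq_tiltA m true true hok]
  have h1 : OkS (tiltA m true true) := by
    rw [← tiltB_eq_tiltA m true true hok]; exact ok_tiltB m true true
  rw [tiltB_eq_tiltA _ false true h1]
  have h2 : OkS (tiltA (tiltA m true true) false true) := by
    rw [← tiltB_eq_tiltA _ false true h1]; exact ok_tiltB _ false true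
  rw [tiltB_eq_tiltA _ true false h2]
  have h3 : OkS (tiltA (tiltA (tiltA m true true) false true) true false) := by
    rw [← tiltB_eq_tiltA _ true false h2]; exact ok_tiltB _ true false
  rw [tiltB_eq_tiltA _ false false h3]

theorem ok_cycleB (m : List String) : OkS (speenCycleB m) := by
  rw [speenCycleB]
  exact ok_tiltB _ _ _

theorem find_val (states : List (List String)) (idx : Int) :
    ∀ (j : Nat), (j : Int) ≤ idx → idx < (j : Int) + states.length →
    ((states.zipIdx j).map (fun p => (p.1, (p.2 : Int)))).find? (fun kv => kv.2 == idx)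
      = (PySem.List.pyGet? states (idx - j)).map (fun s => (s, idx)) := by
  induction states with
  | nil => intro j h0 h1; simp at h0 h1; omega
  | cons s t ih =>
    intro j h0 h1
    simp only [List.length_cons] at h1
    rw [List.zipIdx_cons, List.map_cons, List.find?_cons]
    by_cases he : (j : Int) = idx
    · have hb : ((((s, j).1, ((s, j).2 : Int)).2 : Int) == idx) = true := by simpa using he
      rw [hb]
      have : idx - j = ((0 : Nat) : Int) := by omega
      rw [this, PySem.List.pyGet?_natCast]
      simp
      exact he
    · have hb : ((((s, j).1, ((s, j).2 : Int)).2 : Int) == idx) = false := by simpa using he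
      rw [hb]
      dsimp only
      rw [ih (j + 1) (by push_cast; omega) (by push_cast at h1 ⊢; omega)]
      obtain ⟨m, hm⟩ : ∃ m : Nat, idx - (j : Int) = ((m + 1 : Nat) : Int) :=
        ⟨(idx - (j : Int)).toNat - 1, by push_cast; omega⟩
      have hm2 : idx - ((j + 1 : Nat) : Int) = ((m : Nat) : Int) := by push_cast at hm ⊢; omega
      rw [hm, hm2, PySem.List.pyGet?_natCast, PySem.List.pyGet?_natCast, List.getElem?_cons_succ]

theorem loop_eq (N : Int) : ∀ (fuel : Nat) (d : PySem.Dict (List String) Int)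
    (states : List (List String)) (r : List String),
    OkS r →
    d.items = states.zipIdx.map (fun p => (p.1, (p.2 : Int))) →
    speenLoopA N d r (states.length : Int) fuel = speenLoopB N d states r (states.length : Int) fuel := by
  intro fuel
  induction fuel with
  | zero => intro d states r _ _; rfl
  | succ fuel ih =>
    intro d states r hok hinv
    rw [speenLoopA, speenLoopB]
    have hcyc : speenCycleB r = speenCycleA r := cycle_eq r hok
    have hokr : OkS (speenCycleA r) := by rw [← hcyc]; exact ok_cycleB r
    simp only [hcyc]
    set r' := speenCycleA r with hr'
    by_cases hct : d.contains r' = false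
    · rw [if_pos hct]
      have hget : d.get? r' = none := by
        have := PySem.Dict.contains_eq_isSome_get? d r'
        rw [hct] at this
        exact Option.not_isSome_iff_eq_none.mp (by rw [← this]; simp)
      rw [hget]
      have hitems : (d.insert r' ((states.length : Nat) : Int)).items
          = (states ++ [r']).zipIdx.map (fun p => (p.1, (p.2 : Int))) := by
        rw [PySem.Dict.items_insert_of_not_contains d _ hct, hinv, List.zipIdx_append]
        simp
      have := ih (d.insert r' (states.length : Int)) (states ++ [r']) r' hokr hitems
      rw [show ((states ++ [r']).length : Int) = (states.length : Int) + 1 by simp] at this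
      exact this
    · rw [if_neg hct]
      have hct' : d.contains r' = true := by
        cases h : d.contains r' with
        | false => exact absurd h hct
        | true => rfl
      obtain ⟨v, hget⟩ : ∃ v, d.get? r' = some v := by
        have := PySem.Dict.contains_eq_isSome_get? d r'
        rw [hct'] at this
        exact Option.isSome_iff_exists.mp this.symm
      rw [hget]
      dsimp only
      have hmem := PySem.Dict.mem_items_of_get?_eq_some d hget
      rw [hinv] at hmem
      simp only [List.mem_map] at hmem
      obtain ⟨⟨s0, k⟩, hzin, heq⟩ := hmem
      have hk := List.mem_zipIdx hzin
      simp only at heq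
      have hs0 : s0 = r' := (Prod.mk.injEq _ _ _ _).mp heq |>.1
      have hv : v = (k : Int) := ((Prod.mk.injEq _ _ _ _).mp heq |>.2).symm
      have hklt : k < states.length := by omega
      have hv0 : (0 : Int) ≤ v := by rw [hv]; exact Int.natCast_nonneg k
      have hper : (0 : Int) < (states.length : Int) - v := by
        rw [hv]; omega
      have hmodnn := PySem.Int.mod_nonneg (N - v) hper
      have hmodlt := PySem.Int.mod_lt (N - v) hper
      set idx := v + PySem.Int.mod (N - v) ((states.length : Int) - v) with hidx
      have hidx0 : 0 ≤ idx := by rw [hidx]; omega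
      have hidxlt : idx < (states.length : Int) := by rw [hidx]; omega
      rw [hinv, find_val states idx 0 (by omega) (by push_cast; omega)]
      have h3 : idx - ((0:Nat):Int) = ((idx.toNat : Nat) : Int) := by omega
      rw [h3, PySem.List.pyGet?_natCast]
      have hlt : idx.toNat < states.length := by omega
      rw [List.getElem?_eq_getElem hlt]
      have h4 : idx = (((idx.toNat : Nat)) : Int) := by omega
      rw [show PySem.List.pyGet? states idx = states[idx.toNat]? by
        rw [h4, PySem.List.pyGet?_natCast, Int.toNat_natCast]]
      rw [List.getElem?_eq_getElem hlt]
      rfl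


theorem dom_ok (matrix : List String) (N : Int) (h : Dom_speen matrix N) : OkS matrix := by
  intro s hs c hc
  unfold Dom_speen at h
  rw [Bool.and_eq_true, List.all_eq_true] at h
  have hstr := h.1 s hs
  rw [pvDomStr, List.all_eq_true] at hstr
  have := hstr c hc
  rw [pvDomChar] at this
  simp only [Bool.or_eq_true, Bool.and_eq_true, decide_eq_true_eq, beq_iff_eq] at this
  omega

-- ===== VERDICT (by name: the statement is the Claim_ definition above) =====
theorem speen_spec : Claim_equal_speen := by
  intro matrix N hdom
  unfold Spec_speen speen speen_alt
  have hok : OkS matrix := dom_ok matrix N hdom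
  have hinv : (PySem.Dict.empty.insert matrix (0 : Int)).items
      = ([matrix].zipIdx).map (fun p => (p.1, (p.2 : Int))) := by
    rw [PySem.Dict.items_insert_of_not_contains _ _ (PySem.Dict.contains_empty matrix)]
    simp [PySem.Dict.empty]
  have := loop_eq N N.toNat (PySem.Dict.empty.insert matrix 0) [matrix] matrix hok hinv
  simpa using this
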